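-- pv_equiv track=rewrite | github.com/mispython/AimanPython | Conv_Py/DIBMISM1.py | with_asa
-- ===== SOURCE A (Python) =====
-- PAGE_LENGTH = 60
--
-- def with_asa(lines: list[str], page_length: int = PAGE_LENGTH) -> list[str]:
--     out = []
--     line_in_page = 0
--     for line in lines:
--         asa = '1' if line_in_page == 0 else ' '
--         out.append(asa + line)
--         line_in_page += 1
--         if line_in_page >= page_length:
--             line_in_page = 0
--     return out
-- ===== SOURCE B (Python) =====
-- PAGE_LENGTH = 60
--
-- def with_asa(lines: list[str], page_length: int = PAGE_LENGTH) -> list[str]: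
--     # Page-oriented: peel off one page at a time and mark its head '1', its body ' '.
--     k = page_length if page_length >= 1 else 1   # a page holds at least one line
--     out = []
--     rest = lines
--     while rest:
--         page, rest = rest[:k], rest[k:]
--         out.append('1' + page[0])
--         out += [' ' + line for line in page[1:]]
--     return out
-- ===== Notes on version B (the rewrite author's own statement) =====
-- stated objective: alternative
-- what changed: Instead of a per-line resettable counter, B partitions the input into explicit pages by repeated slicing (rest[:k]/rest[k:], one iteration per page) and emits each page as its '1'-marked head followed by its space-marked body.
import Mathlib
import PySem

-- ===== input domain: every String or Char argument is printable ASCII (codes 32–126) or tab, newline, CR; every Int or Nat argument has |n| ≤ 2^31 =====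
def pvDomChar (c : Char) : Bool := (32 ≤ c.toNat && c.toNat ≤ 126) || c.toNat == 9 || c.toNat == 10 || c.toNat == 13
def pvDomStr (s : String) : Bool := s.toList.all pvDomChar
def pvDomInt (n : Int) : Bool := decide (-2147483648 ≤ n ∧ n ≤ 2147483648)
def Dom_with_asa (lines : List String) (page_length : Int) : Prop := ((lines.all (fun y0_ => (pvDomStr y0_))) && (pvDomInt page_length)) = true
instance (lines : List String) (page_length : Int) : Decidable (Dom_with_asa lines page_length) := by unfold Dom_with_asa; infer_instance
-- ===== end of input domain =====

-- B replaces A's per-line resettable counter with page-at-a-time slicing: peel off one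
-- page, mark its head '1' and its body ' ' (alternative decomposition, same cost).

-- ===== PORT A =====
-- loop body of A's for-loop (state = (out, line_in_page)), named so the proofs can speak about it
def asaStep (page_length : Int) (st : List String × Int) (line : String) : List String × Int :=
  let asa : String := if st.2 == 0 then "1" else " "
  let out := st.1 ++ [asa ++ line]
  let lp := st.2 + 1
  (out, if lp ≥ page_length then 0 else lp)

def with_asa (lines : List String) (page_length : Int) : List String :=
  (lines.foldl (asaStep page_length) (([] : List String), 0)).1

-- ===== PORT B =====
-- one iteration of Source B's while loop: the page is the head plus the next k lines
-- (k = page size − 1); the head gets '1', the body ' ', then recurse on the rest.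
def asaPages (k : Nat) (lines : List String) : List String :=
  match lines with
  | [] => []
  | l :: ls =>
      ("1" ++ l) :: ((ls.take k).map (fun x => " " ++ x) ++ asaPages k (ls.drop k))
termination_by lines.length
decreasing_by simp only [List.length_drop, List.length_cons]; omega

def with_asa_alt (lines : List String) (page_length : Int) : List String :=
  let k : Nat := if 1 ≤ page_length then page_length.toNat else 1
  asaPages (k - 1) lines

-- ===== PRECONDITION & SPEC =====
def Spec_with_asa (lines : List String) (page_length : Int) (out : List String) : Prop := out = with_asa_alt lines page_length
instance (lines : List String) (page_length : Int) (out : List String) : Decidable (Spec_with_asa lines page_length out) := by unfold Spec_with_asa; infer_instance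

-- ===== CLAIM (what is proved, stated in full; the proofs are below) =====
def Claim_equal_with_asa : Prop := ∀ (lines : List String) (page_length : Int), Dom_with_asa lines page_length → Spec_with_asa lines page_length (with_asa lines page_length)

-- ===== LEMMAS AND PROOFS =====

theorem asaPages_nil (k : Nat) : asaPages k [] = [] := by
  rw [asaPages.eq_def]

theorem asaPages_cons (k : Nat) (l : String) (ls : List String) :
    asaPages k (l :: ls)
      = ("1" ++ l) :: ((ls.take k).map (fun x => " " ++ x) ++ asaPages k (ls.drop k)) := by
  rw [asaPages.eq_def]

-- both sides are related through the index-residue form used as a midpoint in the proof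
def enumMark (pl : Int) (lines : List String) (s : Int) : List String :=
  (PySem.List.enumerate lines s).map
    (fun p => (if PySem.Int.mod p.1 pl == 0 then "1" else " ") ++ p.2)

theorem enumMark_nil (pl s : Int) : enumMark pl [] s = [] := by
  simp [enumMark, PySem.List.enumerate_nil]

theorem enumMark_cons (pl s : Int) (l : String) (ls : List String) :
    enumMark pl (l :: ls) s
      = ((if PySem.Int.mod s pl == 0 then "1" else " ") ++ l) :: enumMark pl ls (s + 1) := by
  simp [enumMark, PySem.List.enumerate_cons]

-- page_length < 1: A's counter resets on every step, every line gets '1'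
theorem asa_small (pl : Int) (hpl : pl < 1) :
    ∀ (lines : List String) (acc : List String),
      (lines.foldl (asaStep pl) (acc, 0)).1 = acc ++ lines.map (fun line => "1" ++ line) := by
  intro lines
  induction lines with
  | nil => intro acc; simp
  | cons l ls ih =>
      intro acc
      have h1 : (1 : Int) ≥ pl := by omega
      simp only [List.foldl_cons, asaStep, h1, zero_add, if_pos, beq_self_eq_true,
        List.map_cons]
      rw [ih]
      simp

-- page_length < 1 on B's side: pages of size 1, every line gets '1'
theorem asaPages_zero :
    ∀ (lines : List String), asaPages 0 lines = lines.map (fun line => "1" ++ line) := by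
  intro lines
  induction lines with
  | nil => simp [asaPages_nil]
  | cons l ls ih => rw [asaPages_cons]; simpa using ih

-- the residue-marked map depends on the start index only through its residue mod pl
theorem enumMark_congr (pl : Int) (hpl : 1 ≤ pl) :
    ∀ (xs : List String) (s t : Int), s % pl = t % pl →
      enumMark pl xs s = enumMark pl xs t := by
  intro xs
  induction xs with
  | nil => intro s t _; simp [enumMark_nil]
  | cons x xs ih =>
      intro s t hst
      rw [enumMark_cons, enumMark_cons]
      have hm : PySem.Int.mod s pl = PySem.Int.mod t pl := by
        rw [PySem.Int.mod_eq_emod_of_pos (show (0:Int) < pl by omega),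
          PySem.Int.mod_eq_emod_of_pos (show (0:Int) < pl by omega), hst]
      rw [hm, ih (s + 1) (t + 1) (by rw [Int.add_emod, Int.add_emod t, hst])]

-- A side: counter c (0 ≤ c < pl) corresponds to index residue c
theorem asa_inv (pl : Int) (hpl : 1 ≤ pl) :
    ∀ (lines : List String) (acc : List String) (c : Int), 0 ≤ c → c < pl →
      (lines.foldl (asaStep pl) (acc, c)).1 = acc ++ enumMark pl lines c := by
  intro lines
  induction lines with
  | nil => intro acc c _ _; simp [enumMark_nil]
  | cons l ls ih =>
      intro acc c hc0 hcpl
      rw [List.foldl_cons, enumMark_cons]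
      have hmodc : PySem.Int.mod c pl = c := by
        rw [PySem.Int.mod_eq_emod_of_pos (show (0:Int) < pl by omega)]
        exact Int.emod_eq_of_lt hc0 hcpl
      have hcond : (PySem.Int.mod c pl == 0) = (c == 0) := by rw [hmodc]
      show (ls.foldl (asaStep pl)
        (acc ++ [(if c == 0 then "1" else " ") ++ l], if c + 1 ≥ pl then 0 else c + 1)).1 = _
      by_cases hreset : c + 1 ≥ pl
      · have hc : c + 1 = pl := by omega
        rw [if_pos hreset, ih _ 0 le_rfl (by omega),
          enumMark_congr pl hpl ls 0 (c + 1) (by rw [hc]; simp)]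
        simp [hcond]
      · rw [if_neg hreset, ih _ (c + 1) (by omega) (by omega)]
        simp [hcond]

-- middle of a page: from residue s (1 ≤ s ≤ pl) the next (pl − s) lines get ' ', then a new page
theorem enumMark_mid (pl : Int) (hpl : 1 ≤ pl) :
    ∀ (ls : List String) (s : Int), 1 ≤ s → s ≤ pl →
      enumMark pl ls s
        = (ls.take (pl - s).toNat).map (fun x => " " ++ x)
            ++ enumMark pl (ls.drop (pl - s).toNat) 0 := by
  intro ls
  induction ls with
  | nil => intro s _ _; simp [enumMark_nil]
  | cons x xs ih =>
      intro s hs1 hspl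
      by_cases hend : s = pl
      · have h0 : ((pl - s).toNat : Nat) = 0 := by omega
        rw [h0]
        simp only [List.take_zero, List.map_nil, List.drop_zero, List.nil_append]
        exact enumMark_congr pl hpl (x :: xs) s 0 (by rw [hend]; simp)
      · have hslt : s < pl := lt_of_le_of_ne hspl hend
        have htn : (pl - s).toNat = (pl - (s + 1)).toNat + 1 := by omega
        rw [htn, enumMark_cons, List.take_succ_cons, List.map_cons, List.drop_succ_cons]
        have hmods : PySem.Int.mod s pl = s := by
          rw [PySem.Int.mod_eq_emod_of_pos (show (0:Int) < pl by omega)]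
          exact Int.emod_eq_of_lt (by omega) hslt
        have hne : (PySem.Int.mod s pl == 0) = false := by
          rw [hmods]; exact beq_false_of_ne (by omega)
        rw [hne, ih (s + 1) (by omega) (by omega)]
        simp

-- B side: page slicing produces the residue-marked list
theorem asaPages_eq_enumMark (pl : Int) (hpl : 1 ≤ pl) :
    ∀ (n : Nat) (lines : List String), lines.length ≤ n →
      asaPages (pl.toNat - 1) lines = enumMark pl lines 0 := by
  intro n
  induction n with
  | zero =>
      intro lines hlen
      have : lines = [] := List.eq_nil_of_length_eq_zero (by omega)
      subst this; simp [asaPages_nil, enumMark_nil]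
  | succ n ih =>
      intro lines hlen
      cases lines with
      | nil => simp [asaPages_nil, enumMark_nil]
      | cons l ls =>
          rw [asaPages_cons, enumMark_cons]
          have h0 : PySem.Int.mod 0 pl = 0 := by
            rw [PySem.Int.mod_eq_emod_of_pos (show (0:Int) < pl by omega)]; simp
          rw [h0]
          have hk : pl.toNat - 1 = (pl - 1).toNat := by omega
          have hmid := enumMark_mid pl hpl ls 1 le_rfl hpl
          have hrest := ih (ls.drop (pl.toNat - 1)) (by
            have := List.length_drop (l := ls) (i := pl.toNat - 1)
            simp at hlen ⊢; omega)
          rw [hk] at hrest ⊢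
          simp only [zero_add, beq_self_eq_true, if_true]
          rw [hrest, hmid]

-- ===== VERDICT (by name: the statement is the Claim_ definition above) =====
theorem with_asa_spec : Claim_equal_with_asa := by
  intro lines pl _
  unfold Spec_with_asa with_asa with_asa_alt
  by_cases h : 1 ≤ pl
  · rw [if_pos h, asa_inv pl h lines [] 0 le_rfl (by omega), List.nil_append,
      asaPages_eq_enumMark pl h lines.length lines le_rfl]
  · rw [if_neg h, asa_small pl (by omega) lines [], List.nil_append, asaPages_zero]
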